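-- pv_equiv track=rewrite | github.com/nicfigu/Advent-Calendar | Day4/solution.py | get_card_points
-- ===== SOURCE A (Python) =====
-- def get_card_points(line):
--     #get winning numbers by starting after card num and ending at break char
--     start_index = line.find(':')
--     end_index = line.find('|', start_index + 1)  # Start searching after the start_char
--     result = line[start_index + 1:end_index]
--     win_nums_arr = result.split()
--     win_set = set()
--     for i in win_nums_arr:
--         win_set.add(i)
--     my_nums = line[end_index+2: len(line)]
--     my_nums = my_nums.split()
--     count = 0
--     points = 0
--     for i in my_nums:
--         if i in win_set:
--             count += 1
--             if count == 1:
--                 points = 1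
--             else:
--                 points *= 2
--     return [points, count]
-- ===== SOURCE B (Python) =====
-- def get_card_points(line):
--     # Inverted counting: tally my numbers into a dict once, then loop over the
--     # distinct winning numbers summing their tallies; points by a closed-form shift.
--     start_index = line.find(':')
--     end_index = line.find('|', start_index + 1)
--     win_tokens = line[start_index + 1:end_index].split()
--     tally = {}
--     for x in line[end_index + 2:].split():
--         tally[x] = tally.get(x, 0) + 1
--     count = 0
--     for w in dict.fromkeys(win_tokens):
--         count += tally.get(w, 0)
--     points = (1 << (count - 1)) if count else 0
--     return [points, count]
-- ===== Notes on version B (the rewrite author's own statement) =====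
-- stated objective: alternative
-- what changed: Inverts the counting: instead of scanning my numbers against a set of winning numbers with a stateful points/count accumulator, B builds a tally dict of my numbers once, sums the tallies of the distinct winning numbers, and computes the points with a closed-form shift.
import Mathlib
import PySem

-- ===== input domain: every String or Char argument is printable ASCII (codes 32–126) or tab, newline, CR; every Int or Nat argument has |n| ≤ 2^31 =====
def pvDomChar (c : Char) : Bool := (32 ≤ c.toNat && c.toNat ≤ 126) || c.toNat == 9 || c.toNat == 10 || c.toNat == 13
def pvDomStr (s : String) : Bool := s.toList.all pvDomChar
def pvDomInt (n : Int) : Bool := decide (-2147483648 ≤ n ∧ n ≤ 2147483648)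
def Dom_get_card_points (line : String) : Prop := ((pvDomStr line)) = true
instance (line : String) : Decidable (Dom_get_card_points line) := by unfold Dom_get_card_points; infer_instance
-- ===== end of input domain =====

-- B inverts the counting: it tallies my numbers into a dict once, sums the tallies of the
-- distinct winning numbers, and computes the points with a closed-form shift (objective: alternative).
-- ===== PORT A =====
def get_card_points (line : String) : List Int :=
  let start_index := PySem.Str.find line ":"
  let end_index := PySem.Str.findFrom line "|" (start_index + 1) none
  let result := PySem.Str.slice line (some (start_index + 1)) (some end_index)
  let win_nums_arr := PySem.Str.split₀ result
  let win_set := win_nums_arr.foldl PySem.Set.add (PySem.Set.empty : PySem.Set String)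
  let my_nums := PySem.Str.slice line (some (end_index + 2)) (some ((PySem.Str.len line : Int)))
  let my_nums := PySem.Str.split₀ my_nums
  let pc := my_nums.foldl (fun (s : Int × Int) i =>
      if PySem.Set.contains win_set i then
        let count := s.2 + 1
        ((if count == 1 then 1 else s.1 * 2), count)
      else s) ((0 : Int), (0 : Int))
  [pc.1, pc.2]

-- ===== PORT B =====
def get_card_points_alt (line : String) : List Int :=
  let start_index := PySem.Str.find line ":"
  let end_index := PySem.Str.findFrom line "|" (start_index + 1) none
  let win_tokens := PySem.Str.split₀ (PySem.Str.slice line (some (start_index + 1)) (some end_index))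
  let tally := (PySem.Str.split₀ (PySem.Str.slice line (some (end_index + 2)) none)).foldl
      (fun (d : PySem.Dict String Int) x => d.insert x (d.getD x 0 + 1)) PySem.Dict.empty
  let count := (PySem.List.dedup win_tokens).foldl (fun (acc : Int) w => acc + tally.getD w 0) 0
  let points : Int := if count = 0 then 0 else (1 : Int) <<< (count - 1).toNat
  [points, count]

-- ===== PRECONDITION & SPEC =====
def Spec_get_card_points (line : String) (out : List Int) : Prop := out = get_card_points_alt line
instance (line : String) (out : List Int) : Decidable (Spec_get_card_points line out) := by unfold Spec_get_card_points; infer_instance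

-- ===== CLAIM (what is proved, stated in full; the proofs are below) =====
def Claim_equal_get_card_points : Prop := ∀ (line : String), Dom_get_card_points line → Spec_get_card_points line (get_card_points line)

-- ===== LEMMAS AND PROOFS =====

-- A's loop, started at a count >= 1, doubles points once per match and adds the matches to count.
theorem loopA_pos (cond : String → Bool) (l : List String) (p c : Int) (hc : 1 ≤ c) :
    l.foldl (fun (s : Int × Int) i =>
      if cond i then ((if s.2 + 1 == 1 then 1 else s.1 * 2), s.2 + 1) else s) (p, c)
    = (p * 2 ^ l.countP cond, c + l.countP cond) := by
  induction l generalizing p c with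
  | nil => simp
  | cons x l ih =>
    simp only [List.foldl_cons, List.countP_cons]
    by_cases hx : cond x
    · simp only [hx, if_true]
      rw [if_neg (by simp; omega : ¬ ((c + 1 == 1) = true))]
      rw [ih (p * 2) (c + 1) (by omega)]
      simp only [Prod.mk.injEq]
      constructor
      · rw [pow_succ]; ring
      · push_cast; ring
    · simp only [hx, if_false, Bool.false_eq_true]
      rw [ih p c hc]
      simp

-- A's loop from (0,0) computes the closed form.
theorem loopA_zero (cond : String → Bool) (l : List String) :
    l.foldl (fun (s : Int × Int) i =>
      if cond i then ((if s.2 + 1 == 1 then 1 else s.1 * 2), s.2 + 1) else s) ((0 : Int), (0 : Int))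
    = ((if l.countP cond = 0 then (0 : Int) else 2 ^ (l.countP cond - 1)), (l.countP cond : Int)) := by
  induction l with
  | nil => simp
  | cons x l ih =>
    simp only [List.foldl_cons, List.countP_cons]
    by_cases hx : cond x
    · simp only [hx, if_true]
      rw [if_pos (by decide : (((0:Int) + 1 == 1) = true))]
      rw [zero_add]
      rw [loopA_pos cond l 1 1 le_rfl]
      simp only [Prod.mk.injEq]
      refine ⟨?_, by push_cast; ring⟩
      rw [if_neg (by omega), Nat.add_sub_cancel, one_mul]
    · simp only [hx, if_false, Bool.false_eq_true]
      rw [ih]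
      simp

-- slicing to exactly the length is slicing to the end
theorem slice_len_none {α : Type} (xs : List α) (a : Int) :
    PySem.List.slice xs (some a) (some (xs.length : Int)) = PySem.List.slice xs (some a) none := by
  simp [PySem.List.slice]

theorem str_slice_len_none (s : String) (a : Int) :
    PySem.Str.slice s (some a) (some (PySem.Str.len s : Int)) = PySem.Str.slice s (some a) none := by
  show String.ofList _ = String.ofList _
  congr 1
  have h : (PySem.Str.len s : Int) = ((s.toList.length : Nat) : Int) := by
    simp [PySem.Str.len_eq]
  rw [h]
  exact slice_len_none _ _

-- summing the indicator of one element over a duplicate-free list is a membership test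
theorem sum_indicator (x : String) (ws : List String) (hnd : ws.Nodup) :
    (ws.map (fun w => if w = x then (1 : Int) else 0)).sum = if x ∈ ws then 1 else 0 := by
  induction ws with
  | nil => simp
  | cons w ws ih =>
    rw [List.nodup_cons] at hnd
    obtain ⟨hw, hnd2⟩ := hnd
    simp only [List.map_cons, List.sum_cons, ih hnd2, List.mem_cons]
    by_cases hwx : w = x
    · subst hwx
      simp [hw]
    · have hxw : ¬ x = w := fun h => hwx h.symm
      simp [hwx, hxw]

-- On a duplicate-free key list, summing per-key occurrence counts of l counts
-- l's elements that belong to the key list (the heart of B's inverted counting).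
theorem sum_count_eq_countP (ws l : List String) (hnd : ws.Nodup) :
    (ws.map (fun w => (l.count w : Int))).sum = (l.countP (fun x => decide (x ∈ ws)) : Int) := by
  induction l with
  | nil => simp
  | cons x l ih =>
    have hcc : ∀ w ∈ ws, ((x :: l).count w : Int) = (l.count w : Int) + (if w = x then 1 else 0) := by
      intro w _
      by_cases h : w = x
      · subst h
        rw [List.count_cons_self, if_pos rfl]
        push_cast
        ring
      · simp [List.count_cons, h]
        exact fun hh => h hh.symm
    rw [List.countP_cons]
    calc (ws.map (fun w => ((x :: l).count w : Int))).sum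
        = (ws.map (fun w => (l.count w : Int) + (if w = x then (1 : Int) else 0))).sum := by
          exact congrArg List.sum (List.map_congr_left hcc)
      _ = (ws.map (fun w => (l.count w : Int))).sum
          + (ws.map (fun w => if w = x then (1 : Int) else 0)).sum := by
          rw [← List.sum_map_add]
      _ = _ := by
          rw [ih, sum_indicator x ws hnd]
          by_cases hmem : x ∈ ws <;> simp [hmem]

-- A's hand-built set membership test is membership in the deduplicated token list
theorem contains_foldl_add (wt : List String) (x : String) :
    PySem.Set.contains (wt.foldl PySem.Set.add (PySem.Set.empty : PySem.Set String)) x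
      = decide (x ∈ PySem.List.dedup wt) := by
  rw [show wt.foldl PySem.Set.add (PySem.Set.empty : PySem.Set String) = PySem.Set.ofList wt from
    (PySem.Set.ofList_eq_foldl wt).symm]
  rw [PySem.Set.contains_eq_decide]
  simp [PySem.Set.mem_ofList]

-- the two ports agree once parsing has produced the winning tokens and my numbers
theorem combine (wt ml : List String) :
    (let win_set := wt.foldl PySem.Set.add (PySem.Set.empty : PySem.Set String)
     let pc := ml.foldl (fun (s : Int × Int) i =>
        if PySem.Set.contains win_set i then
          ((if s.2 + 1 == 1 then 1 else s.1 * 2), s.2 + 1) else s) ((0 : Int), (0 : Int))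
     [pc.1, pc.2])
    = (let tally := ml.foldl
        (fun (d : PySem.Dict String Int) x => d.insert x (d.getD x 0 + 1)) PySem.Dict.empty
       let count := (PySem.List.dedup wt).foldl (fun (acc : Int) w => acc + tally.getD w 0) 0
       [(if count = 0 then 0 else (1 : Int) <<< (count - 1).toNat), count]) := by
  simp only []
  rw [loopA_zero (fun i => PySem.Set.contains (wt.foldl PySem.Set.add (PySem.Set.empty : PySem.Set String)) i) ml]
  rw [PySem.List.foldl_add]
  have hg : ((PySem.List.dedup wt).map (fun w =>
      (ml.foldl (fun (d : PySem.Dict String Int) x => d.insert x (d.getD x 0 + 1))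
        PySem.Dict.empty).getD w 0)).sum
      = ((PySem.List.dedup wt).map (fun w => (ml.count w : Int))).sum := by
    refine congrArg List.sum (List.map_congr_left ?_)
    intro w _
    rw [PySem.Dict.getD_foldl_insert_add_one, PySem.Dict.getD_empty, zero_add]
  rw [hg, sum_count_eq_countP _ _ (PySem.List.nodup_dedup wt)]
  have hcond : (ml.countP fun i =>
      PySem.Set.contains (wt.foldl PySem.Set.add (PySem.Set.empty : PySem.Set String)) i)
      = ml.countP (fun x => decide (x ∈ PySem.List.dedup wt)) := by
    exact List.countP_congr (fun x _ => by rw [contains_foldl_add])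
  rw [hcond]
  set c := ml.countP (fun x => decide (x ∈ PySem.List.dedup wt)) with hc
  rcases Nat.eq_zero_or_pos c with h | h
  · simp [h]
  · have h0 : ((c : Int) + 0) ≠ 0 := by omega
    have hne : (c : Int) ≠ 0 := by omega
    rw [if_neg (Nat.pos_iff_ne_zero.mp h)]
    rw [if_neg (by omega : ¬ ((0 : Int) + (c : Int)) = 0)]
    have ht : (((0 : Int) + (c : Int)) - 1).toNat = c - 1 := by omega
    rw [ht, Int.shiftLeft_eq, one_mul]
    simp

theorem get_card_points_eq (line : String) :
    get_card_points line = get_card_points_alt line := by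
  simp only [get_card_points, get_card_points_alt, str_slice_len_none]
  exact combine _ _

-- ===== VERDICT (by name: the statement is the Claim_ definition above) =====
theorem get_card_points_spec : Claim_equal_get_card_points := by
  intro line _
  unfold Spec_get_card_points
  exact get_card_points_eq line
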